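-- pv_equiv track=rewrite | github.com/bonndomi/adventofcode2020 | adventofcode/advent3.py | read_pattern_lines
-- ===== SOURCE A (Python) =====
-- import typing
--
-- def read_pattern_lines(lines: typing.Iterator[str], pattern: tuple[int, int]) -> typing.Iterator[str]:
--     y, x = pattern
--     x_position = 0
--
--     for i, l in enumerate(lines):
--         if i % y != 0:
--             continue
--         yield l[x_position % len(l)]
--         x_position += x
-- ===== SOURCE B (Python) =====
-- import typing
--
--
-- def read_pattern_lines(lines: typing.Iterator[str], pattern: tuple[int, int]) -> typing.Iterator[str]:
--     # Materialize the lines once, then jump straight to rows 0, |y|, 2|y|, ...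
--     # by index (skipped rows are never touched and there is no i % y test);
--     # the k-th visited row contributes column (k * x) % len(row) in closed form.
--     # (i % y == 0 in A selects exactly the indices divisible by |y|, either sign.)
--     y, x = pattern
--     grid = list(lines)
--     step = abs(y)
--     out = []
--     i = 0
--     k = 0
--     while i < len(grid):
--         row = grid[i]
--         out.append(row[(k * x) % len(row)])
--         i += step
--         k += 1
--     yield from out
-- ===== Notes on version B (the rewrite author's own statement) =====
-- stated objective: alternative
-- what changed: Instead of streaming every line through an i % y skip test with a mutable x_position accumulator, B materializes the lines into a list, jumps by index straight to rows 0, |y|, 2|y|, ... (skipped rows are never visited), and computes the k-th visited row's column as (k*x) % len in closed form.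
import Mathlib
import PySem

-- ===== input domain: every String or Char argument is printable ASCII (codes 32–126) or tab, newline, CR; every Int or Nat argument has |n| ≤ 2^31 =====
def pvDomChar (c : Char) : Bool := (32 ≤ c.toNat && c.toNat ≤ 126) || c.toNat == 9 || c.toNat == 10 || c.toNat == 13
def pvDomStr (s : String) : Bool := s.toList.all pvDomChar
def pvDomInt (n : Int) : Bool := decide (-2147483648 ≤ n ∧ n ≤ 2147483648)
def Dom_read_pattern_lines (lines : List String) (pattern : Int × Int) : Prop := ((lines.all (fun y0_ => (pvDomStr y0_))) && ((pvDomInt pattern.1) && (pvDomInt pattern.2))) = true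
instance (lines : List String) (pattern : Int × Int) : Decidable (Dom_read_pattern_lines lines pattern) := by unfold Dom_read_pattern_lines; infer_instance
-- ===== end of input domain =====

-- B materializes the lines and jumps by index to rows 0, |y|, 2|y|, … with the
-- column computed as (k*x) % len in closed form, instead of A's streaming scan
-- with an i % y skip branch and a mutable column accumulator (objective:
-- alternative). Equivalence is about the RETURN value (both generators fully
-- consumed as lists); A is lazy where B is eager.

-- ===== PORT A =====
-- A's loop body as a step function on the state (x_position, yielded-so-far);
-- the ZeroDivisionError / IndexError cases (empty selected line, y = 0) are the
-- `none` branch and are excluded by Pre_.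
def readStepA (y x : Int) : Int × List String → Int × String → Int × List String
  | (xp, acc), (i, l) =>
    if PySem.Int.mod i y ≠ 0 then (xp, acc)
    else
      match PySem.Str.pyGet? l (PySem.Int.mod xp (PySem.Str.len l)) with
      | some c => (xp + x, acc ++ [String.ofList [c]])
      | none => (xp, acc)

def read_pattern_lines (lines : List String) (pattern : Int × Int) : List String :=
  (List.foldl (readStepA pattern.1 pattern.2) (0, []) (PySem.List.enumerate lines 0)).2

-- ===== PORT B =====
-- B's `while i < len(grid)` index-jump loop.  Python diverges when step = 0
-- (y = 0, nonempty grid) — outside Pre_; for totality the port advances by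
-- max step 1 there (identical to i + step whenever step > 0).
def bLoop (grid : List String) (step : Nat) (x : Int) (i k : Nat) (out : List String) : List String :=
  if h : i < grid.length then
    let row := grid[i]
    let out' := out ++
      (match PySem.Str.pyGet? row (PySem.Int.mod ((k : Int) * x) (PySem.Str.len row)) with
        | some c => [String.ofList [c]]
        | none => [])
    bLoop grid step x (i + max step 1) (k + 1) out'
  else out
termination_by grid.length - i
decreasing_by
  have h1 : 1 ≤ max step 1 := Nat.le_max_right step 1
  omega

def read_pattern_lines_alt (lines : List String) (pattern : Int × Int) : List String :=
  bLoop lines pattern.1.natAbs pattern.2 0 0 []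

-- ===== PRECONDITION & SPEC =====
-- Pre_ excludes exactly the inputs where A raises: y = 0 with at least one line
-- (ZeroDivisionError at i % y), and any empty line at a selected index (index
-- divisible by |y|), where A raises ZeroDivisionError on len(l) = 0.
def Pre_read_pattern_lines (lines : List String) (pattern : Int × Int) : Prop :=
  (lines = [] ∨ pattern.1 ≠ 0) ∧
  ∀ i : Nat, i < lines.length → i % pattern.1.natAbs = 0 → lines.getD i "" ≠ ""
instance (lines : List String) (pattern : Int × Int) : Decidable (Pre_read_pattern_lines lines pattern) := by
  unfold Pre_read_pattern_lines; infer_instance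

def pvWitness_read_pattern_lines : List String × (Int × Int) := (["ab", "cd", "ef", "gh"], (2, 3))

def Spec_read_pattern_lines (lines : List String) (pattern : Int × Int) (out : List String) : Prop := out = read_pattern_lines_alt lines pattern
instance (lines : List String) (pattern : Int × Int) (out : List String) : Decidable (Spec_read_pattern_lines lines pattern out) := by unfold Spec_read_pattern_lines; infer_instance

-- ===== CLAIM (what is proved, stated in full; the proofs are below) =====
def Claim_equal_read_pattern_lines : Prop := ∀ (lines : List String) (pattern : Int × Int), Dom_read_pattern_lines lines pattern → Pre_read_pattern_lines lines pattern → Spec_read_pattern_lines lines pattern (read_pattern_lines lines pattern)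

-- ===== LEMMAS AND PROOFS =====

-- every step-th line of a list, head first (the rows B's index jumps visit)
def takeEvery (s : Nat) : List String → List String
  | [] => []
  | l :: rest => l :: takeEvery s (rest.drop (s - 1))
termination_by xs => xs.length
decreasing_by
  simp [List.length_drop]

-- the common value both loops compute, with the running column made explicit
def bspec (x xp : Int) : List String → List String
  | [] => []
  | l :: ls =>
    (match PySem.Str.pyGet? l (PySem.Int.mod xp (PySem.Str.len l)) with
      | some c => [String.ofList [c]]
      | none => []) ++ bspec x (xp + x) ls

theorem drop_takeEvery (s : Nat) (hs : 0 < s) (grid : List String) (i : Nat) (hi : i < grid.length) :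
    takeEvery s (grid.drop i) = grid[i] :: takeEvery s (grid.drop (i + s)) := by
  have h : grid.drop i = grid[i] :: grid.drop (i + 1) := List.drop_eq_getElem_cons hi
  rw [h, takeEvery]
  have h2 : (grid.drop (i + 1)).drop (s - 1) = grid.drop (i + s) := by
    rw [List.drop_drop]
    congr 1
    omega
  rw [h2]

theorem bLoop_eq_bspec (grid : List String) (s : Nat) (hs : 0 < s) (x : Int) :
    ∀ (n i k : Nat) (out : List String), grid.length - i ≤ n →
      bLoop grid s x i k out = out ++ bspec x ((k : Int) * x) (takeEvery s (grid.drop i)) := by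
  intro n
  induction n with
  | zero =>
    intro i k out hn
    have hge : grid.length ≤ i := by omega
    rw [bLoop, dif_neg (by omega)]
    rw [List.drop_eq_nil_of_le hge]
    simp [takeEvery, bspec]
  | succ n ih =>
    intro i k out hn
    by_cases hi : i < grid.length
    · rw [bLoop, dif_pos hi]
      have hmax : max s 1 = s := Nat.max_eq_left hs
      rw [hmax]
      have hrec := ih (i + s) (k + 1) (out ++
        (match PySem.Str.pyGet? grid[i] (PySem.Int.mod ((k : Int) * x) (PySem.Str.len grid[i])) with
          | some c => [String.ofList [c]]
          | none => [])) (by omega)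
      rw [hrec, drop_takeEvery s hs grid i hi, bspec]
      have hcol : ((k : Int) + 1) * x = (k : Int) * x + x := by ring
      push_cast
      rw [hcol]
      simp
    · rw [bLoop, dif_neg hi]
      rw [List.drop_eq_nil_of_le (by omega)]
      simp [takeEvery, bspec]

-- a selected nonempty line always yields a character
theorem pyGet?_mod_isSome (l : String) (xp : Int) (hl : l ≠ "") :
    ∃ c, PySem.Str.pyGet? l (PySem.Int.mod xp (PySem.Str.len l)) = some c := by
  have hnil : l.toList ≠ [] := by
    intro h
    exact hl (by simpa using congrArg String.ofList h)
  have hlen : 0 < l.toList.length := List.length_pos_iff.mpr hnil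
  have hlenpos : (0 : Int) < PySem.Str.len l := by
    rw [PySem.Str.len_eq]; exact_mod_cast hlen
  have hm : PySem.Int.mod xp (PySem.Str.len l) = xp % PySem.Str.len l :=
    PySem.Int.mod_eq_emod_of_pos hlenpos
  have h0 : 0 ≤ PySem.Int.mod xp (PySem.Str.len l) := by
    rw [hm]; exact Int.emod_nonneg _ (by omega)
  have h1 : PySem.Int.mod xp (PySem.Str.len l) < PySem.Str.len l := by
    rw [hm]; exact Int.emod_lt_of_pos _ hlenpos
  set i := PySem.Int.mod xp (PySem.Str.len l) with hi
  have hlt : i.toNat < l.toList.length := by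
    rw [PySem.Str.len_eq] at h1; omega
  have key : PySem.Str.pyGet? l i = l.toList[i.toNat]? := by
    conv_lhs => rw [show i = ((i.toNat : Nat) : Int) by omega]
    rw [PySem.Str.pyGet?_natCast]
  exact ⟨l.toList[i.toNat], by rw [key]; exact List.getElem?_eq_getElem hlt⟩

-- skipped stretch: indices never divisible by y leave A's fold state unchanged
theorem fold_skip (y x : Int) (xs : List String) (i0 : Int) (st : Int × List String)
    (h : ∀ j : Nat, j < xs.length → PySem.Int.mod (i0 + j) y ≠ 0) :
    List.foldl (readStepA y x) st (PySem.List.enumerate xs i0) = st := by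
  induction xs generalizing i0 st with
  | nil => simp [PySem.List.enumerate]
  | cons a as ih =>
    rw [PySem.List.enumerate_cons, List.foldl_cons]
    have h0 : PySem.Int.mod i0 y ≠ 0 := by
      have := h 0 (by simp)
      simpa using this
    obtain ⟨xp0, acc0⟩ := st
    have hstep : readStepA y x (xp0, acc0) (i0, a) = (xp0, acc0) := by
      simp only [readStepA]
      rw [if_pos h0]
    rw [hstep]
    exact ih (i0 + 1) (xp0, acc0) (fun j hj => by
      have := h (j + 1) (by simpa using Nat.succ_lt_succ hj)
      have harith : i0 + 1 + (j : Int) = i0 + ((j : Nat) + 1 : Nat) := by push_cast; ring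
      rw [harith]; exact this)

theorem pvIdxBound (s j r : Nat) (h0 : 0 < s) (hj : j < r - (s - 1)) : s + j < r + 1 := by
  omega

-- main invariant: from a selected index, A's fold produces bspec of the kept lines
theorem fold_main (y x : Int) (hy : y ≠ 0) :
    ∀ (n : Nat) (ls : List String), ls.length ≤ n →
    ∀ (i0 xp : Int) (acc : List String),
      ((y.natAbs : Int) ∣ i0) →
      (∀ j : Nat, j < ls.length → j % y.natAbs = 0 → ls.getD j "" ≠ "") →
      List.foldl (readStepA y x) (xp, acc) (PySem.List.enumerate ls i0)
        = (xp + (takeEvery y.natAbs ls).length * x,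
           acc ++ bspec x xp (takeEvery y.natAbs ls)) ∨
      (List.foldl (readStepA y x) (xp, acc) (PySem.List.enumerate ls i0)).2
        = acc ++ bspec x xp (takeEvery y.natAbs ls) := by
  intro n
  induction n with
  | zero =>
    intro ls hls i0 xp acc _ _
    have : ls = [] := List.eq_nil_of_length_eq_zero (by omega)
    subst this
    right; simp [PySem.List.enumerate, takeEvery, bspec]
  | succ n ih =>
    intro ls hls i0 xp acc hdvd hsel
    cases ls with
    | nil => right; simp [PySem.List.enumerate, takeEvery, bspec]
    | cons l rest =>
      set s := y.natAbs with hs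
      have hsabs : s = y.natAbs := hs
      clear_value s
      have hspos : 0 < s := by rw [hsabs]; exact Int.natAbs_pos.mpr hy
      -- head is selected
      have hmod0 : PySem.Int.mod i0 y = 0 := by
        rw [PySem.Int.mod_eq_zero_iff_dvd]
        exact (Int.natAbs_dvd).mp (hsabs ▸ hdvd)
      have hlne : l ≠ "" := by
        have := hsel 0 (by simp) (by simp)
        simpa using this
      obtain ⟨c, hc⟩ := pyGet?_mod_isSome l xp hlne
      have hc' : PySem.List.pyGet? l.toList (PySem.Int.mod xp (l.length : Int)) = some c := by
        simpa using hc
      have hstep : readStepA y x (xp, acc) (i0, l) = (xp + x, acc ++ [String.ofList [c]]) := by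
        simp only [readStepA]
        rw [if_neg (by simp [hmod0]), hc]
      rw [PySem.List.enumerate_cons, List.foldl_cons, hstep]
      -- split rest into the skipped stretch and the remainder
      have hrest : rest = rest.take (s - 1) ++ rest.drop (s - 1) := (List.take_append_drop _ _).symm
      rw [hrest, PySem.List.enumerate_append, List.foldl_append]
      have hskip : List.foldl (readStepA y x) (xp + x, acc ++ [String.ofList [c]])
          (PySem.List.enumerate (rest.take (s - 1)) (i0 + 1))
          = (xp + x, acc ++ [String.ofList [c]]) := by
        apply fold_skip
        intro j hj
        have hjlt : j < s - 1 := by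
          have := List.length_take_le (s - 1) rest
          have := hj.trans_le this
          omega
        intro hdvd2
        rw [PySem.Int.mod_eq_zero_iff_dvd] at hdvd2
        have hdvd2' : ((s : Int)) ∣ (i0 + 1 + j) := by
          rw [hsabs]; exact (Int.natAbs_dvd).mpr hdvd2
        obtain ⟨m, hm⟩ := hdvd
        obtain ⟨m2, hm2⟩ := hdvd2'
        have : ((s : Int)) ∣ ((1 : Int) + j) := by
          have : (1 : Int) + j = (s : Int) * m2 - (s : Int) * m := by omega
          exact this ▸ Dvd.dvd.sub ⟨m2, rfl⟩ ⟨m, rfl⟩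
        have hle := Int.le_of_dvd (by omega) this
        omega
      rw [hskip]
      -- remainder starts at the next selected index
      by_cases hlen : rest.length ≤ s - 1
      · have hdropnil : rest.drop (s - 1) = [] := List.drop_eq_nil_of_le hlen
        rw [hdropnil]
        right
        simp [PySem.List.enumerate, takeEvery, bspec, hc']
      · push_neg at hlen
        have hld : (List.drop (s - 1) rest).length = rest.length - (s - 1) := List.length_drop
        have htake : (rest.take (s - 1)).length = s - 1 := by
          simp [List.length_take]; omega
        have hstart : i0 + 1 + ((rest.take (s - 1)).length : Int) = i0 + s := by
          rw [htake]; omega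
        rw [hstart]
        have hih := ih (rest.drop (s - 1)) (by
            simp only [List.length_cons] at hls
            omega)
          (i0 + s) (xp + x) (acc ++ [String.ofList [c]])
          (by obtain ⟨m, hm⟩ := hdvd; exact ⟨m + 1, by rw [hm]; ring⟩)
          (by
            intro j hj hjmod
            have hj' : j < rest.length - (s - 1) := by rw [hld] at hj; exact hj
            have hk : s + j = (s - 1 + j) + 1 := by omega
            have heq : (rest.drop (s - 1)).getD j "" = (l :: rest).getD (s + j) "" := by
              rw [List.getD, List.getD]
              have h1 : (rest.drop (s - 1))[j]? = rest[s - 1 + j]? := List.getElem?_drop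
              have h2 : (l :: rest)[s + j]? = rest[s - 1 + j]? := by
                conv_lhs => rw [hk]
                rw [List.getElem?_cons_succ]
              rw [h1, h2]
            rw [heq]
            exact hsel (s + j)
              (by simp only [List.length_cons]; exact pvIdxBound s j rest.length hspos hj')
              (by rw [Nat.add_mod_left]; exact hjmod))
        -- combine with the kept-list equation
        have hkept : takeEvery s (l :: rest) = l :: takeEvery s (rest.drop (s - 1)) := by
          rw [takeEvery]
        cases hih with
        | inl h =>
          right
          rw [h]
          simp [hkept, bspec, hc']
        | inr h =>
          right
          rw [h]
          simp [hkept, bspec, hc']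

-- ===== VERDICT (by name: the statement is the Claim_ definition above) =====
theorem read_pattern_lines_spec : Claim_equal_read_pattern_lines := by
  intro lines pattern _dom hpre
  obtain ⟨hy0, hsel⟩ := hpre
  unfold Spec_read_pattern_lines read_pattern_lines read_pattern_lines_alt
  cases hy0 with
  | inl hnil =>
    subst hnil
    rw [bLoop]
    simp [PySem.List.enumerate]
  | inr hy =>
    have hspos : 0 < pattern.1.natAbs := Int.natAbs_pos.mpr hy
    rw [bLoop_eq_bspec lines pattern.1.natAbs hspos pattern.2 lines.length 0 0 [] (by omega)]
    simp only [List.drop_zero, Nat.cast_zero, zero_mul, List.nil_append]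
    have h := fold_main pattern.1 pattern.2 hy lines.length lines le_rfl 0 0 [] ⟨0, by ring⟩ hsel
    cases h with
    | inl h => rw [h]; simp
    | inr h => rw [h]; simp
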